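-- pv_equiv track=rewrite | github.com/costamay/codility-practice | sanotoriumAccomodation.py | solution
-- ===== SOURCE A (Python) =====
-- def solution(A):
--
--     # Implement your solution here
--     A.sort(reverse=False)
--     Numofrooms = 1
--     room_cap = A[0]
--     guest_in = 1
--     for i in range(1,len(A)):
--         if guest_in < room_cap:
--             guest_in+=1
--         else:
--             Numofrooms +=1
--             room_cap = A[i]
--             guest_in = 1
--     return Numofrooms
-- ===== SOURCE B (Python) =====
-- def solution(A):
--     A.sort()
--     rooms = 0
--     i = 0
--     while i < len(A):
--         rooms += 1
--         i += max(A[i], 1)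
--     return rooms
-- ===== Notes on version B (the rewrite author's own statement) =====
-- stated objective: simpler
-- what changed: B replaces A's per-guest loop with accumulator state (rooms, room_cap, guest_in) by a per-room index jump over the sorted list: open a room at index i and advance i by max(A[i],1), counting rooms.
-- outside the precondition, e.g. on solution([]): A raises IndexError, B returns 0
-- crash fix: On empty A, A raises IndexError reading A[0]; B's while loop naturally returns 0. — e.g. on solution([]): A raises IndexError, B returns 0
import Mathlib
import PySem

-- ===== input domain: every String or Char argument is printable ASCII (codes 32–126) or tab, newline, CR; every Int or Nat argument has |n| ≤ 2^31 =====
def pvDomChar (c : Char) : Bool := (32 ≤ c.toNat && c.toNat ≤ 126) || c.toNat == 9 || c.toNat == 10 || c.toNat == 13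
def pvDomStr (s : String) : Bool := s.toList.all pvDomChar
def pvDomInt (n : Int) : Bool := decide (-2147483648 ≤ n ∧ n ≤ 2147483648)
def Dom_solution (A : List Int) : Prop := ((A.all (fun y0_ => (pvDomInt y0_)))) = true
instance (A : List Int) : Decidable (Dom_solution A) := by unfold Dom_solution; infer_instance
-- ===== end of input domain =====

-- B counts rooms by jumping max(cap,1) indices per room over the sorted list instead of
-- walking guest by guest; both sort A in place (equivalence proved about the return value).


-- ===== PORT A =====
-- loop body of A's for-loop; state = (Numofrooms, room_cap, guest_in)
def solutionBody (s : List Int) (st : Int × Int × Int) (i : Int) : Int × Int × Int :=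
  if st.2.2 < st.2.1 then (st.1, st.2.1, st.2.2 + 1)
  else (st.1 + 1, PySem.List.pyGetD s i 0, 1)   -- A[i]; i ∈ range(1,len) is always in range, so getD is exact

-- the body of A after the in-place sort, over the sorted list s
def solutionSorted (s : List Int) : Int :=
  match PySem.List.pyGet? s 0 with                  -- room_cap = A[0]; IndexError on empty A (excluded by Pre_)
  | none => 0
  | some c0 =>
    ((PySem.List.pyRange 1 (s.length : Int) 1).foldl (solutionBody s) (1, c0, 1)).1

def solution (A : List Int) : Int :=
  solutionSorted (PySem.List.sorted A (fun x => x) false)   -- A.sort(reverse=False)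

-- ===== PORT B =====
-- B's while loop: i < len(A): rooms += 1; i += max(A[i], 1)
def altGo (s : List Int) (i : Nat) (rooms : Int) : Int :=
  if h : i < s.length then
    altGo s (i + (max (s.getD i 0) 1).toNat) (rooms + 1)   -- A[i], i < len: getD is exact
  else rooms
termination_by s.length - i
decreasing_by
  have h1 : (1 : Int) ≤ max (s.getD i 0) 1 := le_max_right _ _
  omega

def solution_alt (A : List Int) : Int :=
  altGo (PySem.List.sorted A (fun x => x) false) 0 0

-- ===== PRECONDITION & SPEC =====
-- Pre_ excludes only the empty list, on which A raises IndexError at A[0].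
def Pre_solution (A : List Int) : Prop := A ≠ []
instance (A : List Int) : Decidable (Pre_solution A) := by unfold Pre_solution; infer_instance
def pvWitness_solution : List Int := [2, 1, 3]

-- On empty A, A raises IndexError reading A[0]; B's while loop naturally returns 0.
def Raises_solution (A : List Int) : Prop := A = []
instance (A : List Int) : Decidable (Raises_solution A) := by unfold Raises_solution; infer_instance
def pvRaiseWitness_solution : List Int := []
def pvRaiseWitnessOut_solution : Int := 0

def Spec_solution (A : List Int) (out : Int) : Prop := out = solution_alt A
instance (A : List Int) (out : Int) : Decidable (Spec_solution A out) := by unfold Spec_solution; infer_instance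

-- ===== CLAIM (what is proved, stated in full; the proofs are below) =====
def Claim_equal_solution : Prop := ∀ (A : List Int), Dom_solution A → Pre_solution A → Spec_solution A (solution A)
def Claim_raises_solution : Prop := (∀ (A : List Int), Dom_solution A → Raises_solution A → ¬ Pre_solution A) ∧ (Dom_solution (pvRaiseWitness_solution) ∧ Raises_solution (pvRaiseWitness_solution) ∧ solution_alt (pvRaiseWitness_solution) = pvRaiseWitnessOut_solution)

-- ===== LEMMAS AND PROOFS =====
theorem altGo_done (s : List Int) (i : Nat) (rooms : Int) (h : ¬ i < s.length) :
    altGo s i rooms = rooms := by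
  rw [altGo]; simp [h]

theorem altGo_step (s : List Int) (i : Nat) (rooms : Int) (h : i < s.length) :
    altGo s i rooms = altGo s (i + (max (s.getD i 0) 1).toNat) (rooms + 1) := by
  rw [altGo]; simp [h]

-- A's loop from index j with an open room (cap, guest) equals B's jump loop resuming at the
-- index where the current room fills up.
theorem loop_eq (s : List Int) : ∀ (m : Nat) (j rooms cap guest : Int),
    0 ≤ j → j ≤ (s.length : Int) → 1 ≤ guest → m = ((s.length : Int) - j).toNat →
    ((PySem.List.pyRange j (s.length : Int) 1).foldl (solutionBody s) (rooms, cap, guest)).1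
      = altGo s (j + (if guest < cap then cap - guest else 0)).toNat rooms := by
  intro m
  induction m with
  | zero =>
    intro j rooms cap guest hj0 hjn hg hm
    have hj : j = (s.length : Int) := by omega
    rw [PySem.List.pyRange_one_eq_nil (by omega)]
    simp only [List.foldl_nil]
    rw [altGo_done]
    have : (s.length : Int) ≤ j + (if guest < cap then cap - guest else 0) := by
      split <;> omega
    omega
  | succ m ih =>
    intro j rooms cap guest hj0 hjn hg hm
    by_cases hlt : j < (s.length : Int)
    · rw [PySem.List.pyRange_one_cons hlt, List.foldl_cons]
      by_cases hgc : guest < cap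
      · rw [show solutionBody s (rooms, cap, guest) j = (rooms, cap, guest + 1) from by
          simp [solutionBody, hgc]]
        rw [ih (j + 1) rooms cap (guest + 1) (by omega) (by omega) (by omega) (by omega)]
        rw [if_pos hgc]
        congr 1
        by_cases h2 : guest + 1 < cap
        · rw [if_pos h2]; omega
        · rw [if_neg h2]; omega
      · rw [show solutionBody s (rooms, cap, guest) j = (rooms + 1, PySem.List.pyGetD s j 0, 1) from by
          simp [solutionBody, hgc]]
        rw [ih (j + 1) (rooms + 1) (PySem.List.pyGetD s j 0) 1 (by omega) (by omega) (by omega)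
          (by omega)]
        rw [if_neg hgc, add_zero]
        rw [altGo_step s j.toNat rooms (by omega)]
        rw [PySem.List.pyGetD_of_nonneg s 0 hj0]
        congr 1
        have h1 : (1 : Int) <= max (s.getD j.toNat 0) 1 := le_max_right _ _
        by_cases h2 : 1 < s.getD j.toNat 0
        · rw [if_pos h2]
          have : max (s.getD j.toNat 0) 1 = s.getD j.toNat 0 := max_eq_left (by omega)
          omega
        · rw [if_neg h2]
          have : max (s.getD j.toNat 0) 1 = 1 := max_eq_right (by omega)
          omega
    · omega

-- ===== VERDICT (by name: the statement is the Claim_ definition above) =====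
theorem solution_spec : Claim_equal_solution := by
  intro A _ hpre
  unfold Spec_solution solution solution_alt
  have hsne : PySem.List.sorted A (fun x => x) false ≠ [] := by
    intro h
    apply hpre
    have hp := PySem.List.sorted_perm A (fun x => x) false
    rw [h] at hp
    exact (List.Perm.nil_eq hp).symm
  obtain ⟨c, t, hct⟩ := List.exists_cons_of_ne_nil hsne
  rw [hct]
  unfold solutionSorted
  rw [PySem.List.pyGet?_zero_cons]
  simp only
  rw [loop_eq (c :: t) ((((c :: t).length : Int) - 1).toNat) 1 1 c 1 (by omega)
    (by simp) (by omega) rfl]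
  rw [altGo_step (c :: t) 0 0 (by simp)]
  congr 1
  have hg : (c :: t).getD 0 0 = c := rfl
  rw [hg]
  by_cases h2 : 1 < c
  · rw [if_pos h2]
    have : max c 1 = c := max_eq_left (by omega)
    omega
  · rw [if_neg h2]
    have : max c 1 = 1 := max_eq_right (by omega)
    omega

theorem solution_raises : Claim_raises_solution := by
  unfold Claim_raises_solution
  refine ⟨fun A _ hr hp => hp hr, by decide, by decide, ?_⟩
  show solution_alt [] = 0
  unfold solution_alt
  rw [altGo_done]
  have : PySem.List.sorted ([] : List Int) (fun x => x) false = [] := rfl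
  rw [this]
  simp

-- self-check: the recorded witness value is exactly the one theorem solution_raises proves
theorem solution_raises_ok : solution_alt pvRaiseWitness_solution = pvRaiseWitnessOut_solution :=
  solution_raises.2.2.2
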